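-- pv_equiv track=rewrite | github.com/emarkou/HMM-part-of-speech-tagger | hmm_tagger.py | pair_counts
-- ===== SOURCE A (Python) =====
-- from collections import Counter, defaultdict
--
-- def pair_counts(sequences_A, sequences_B):
--     pair_count = defaultdict(dict)
--     sequences_A_flat = [element for sent in sequences_A for element in sent]
--     sequences_B_flat = [element for sent in sequences_B for element in sent]
--     for tag, word in zip(sequences_A_flat, sequences_B_flat):
--         try:
--             pair_count[tag][word]=pair_count[tag][word]+1
--         except KeyError:
--             pair_count[tag][word]=1
--     return pair_count
-- ===== SOURCE B (Python) =====
-- from collections import defaultdict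
--
-- def pair_counts(sequences_A, sequences_B):
--     flat_A = [element for sent in sequences_A for element in sent]
--     flat_B = [element for sent in sequences_B for element in sent]
--     pairs = list(zip(flat_A, flat_B))
--     # distinct tags in first-appearance order
--     seen = []
--     for tag, _word in pairs:
--         if tag not in seen:
--             seen.append(tag)
--     result = defaultdict(dict)
--     for tag in seen:
--         counts = {}
--         for t, w in pairs:
--             if t == tag:
--                 counts[w] = counts.get(w, 0) + 1
--         result[tag] = counts
--     return result
-- ===== Notes on version B (the rewrite author's own statement) =====
-- stated objective: alternative
-- what changed: Replaces A's single pass with in-place nested try/except updates by a per-tag rescan: collect the distinct tags in first-appearance order, then for each tag make a separate scan over the zipped pairs counting that tag's words into a fresh inner dict.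
import Mathlib
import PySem

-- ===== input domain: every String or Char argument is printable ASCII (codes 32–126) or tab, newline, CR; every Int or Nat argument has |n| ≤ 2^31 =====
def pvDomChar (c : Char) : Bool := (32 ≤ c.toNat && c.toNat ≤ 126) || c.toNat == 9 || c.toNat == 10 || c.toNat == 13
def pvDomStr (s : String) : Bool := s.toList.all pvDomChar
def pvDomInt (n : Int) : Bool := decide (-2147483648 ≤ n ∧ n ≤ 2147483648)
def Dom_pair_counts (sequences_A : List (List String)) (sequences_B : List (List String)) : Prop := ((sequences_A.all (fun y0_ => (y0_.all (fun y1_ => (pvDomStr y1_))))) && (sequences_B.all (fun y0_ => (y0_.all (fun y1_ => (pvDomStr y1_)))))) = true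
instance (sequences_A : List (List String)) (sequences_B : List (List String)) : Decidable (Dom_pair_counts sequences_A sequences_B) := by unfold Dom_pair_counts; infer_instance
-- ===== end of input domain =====

-- B replaces A's single-pass nested try/except counting by a per-tag rescan: it collects the
-- distinct tags in first-appearance order, then scans the pairs once per tag counting that
-- tag's words into a fresh inner dict (alternative decomposition, not faster).


-- ===== PORT A =====
-- flatten of the comprehension '[element for sent in xss for element in sent]'
def pcFlatten (xss : List (List String)) : List String := xss.flatMap (fun sent => sent)

-- one iteration of A's loop: try bump pair_count[tag][word], on KeyError set it to 1
def pcStepA (d : PySem.Dict String (PySem.Dict String Int)) (p : String × String) :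
    PySem.Dict String (PySem.Dict String Int) :=
  let inner := d.getD p.1 PySem.Dict.empty
  match inner.get? p.2 with
  | some c => d.insert p.1 (inner.insert p.2 (c + 1))
  | none   => d.insert p.1 (inner.insert p.2 1)

def pair_counts (sequences_A : List (List String)) (sequences_B : List (List String)) :
    List (String × List (String × Int)) :=
  let flatA := pcFlatten sequences_A
  let flatB := pcFlatten sequences_B
  let d := (flatA.zip flatB).foldl pcStepA PySem.Dict.empty
  d.items.map (fun q => (q.1, q.2.items))

-- ===== PORT B =====
-- pass 2, for one tag: 'for t, w in pairs: if t == tag: counts[w] = counts.get(w, 0) + 1'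
def pcCountTag (pairs : List (String × String)) (tag : String) : PySem.Dict String Int :=
  pairs.foldl
    (fun counts p => if p.1 == tag then counts.insert p.2 (counts.getD p.2 0 + 1) else counts)
    PySem.Dict.empty

def pair_counts_alt (sequences_A : List (List String)) (sequences_B : List (List String)) :
    List (String × List (String × Int)) :=
  let flatA := pcFlatten sequences_A
  let flatB := pcFlatten sequences_B
  let pairs := flatA.zip flatB
  -- pass 1: distinct tags in first-appearance order
  let seen := pairs.foldl
    (fun seen p => if PySem.Set.contains seen p.1 then seen else seen ++ [p.1])
    ([] : List String)
  -- pass 2: one counting rescan per tag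
  let result := seen.foldl (fun r tag => r.insert tag (pcCountTag pairs tag)) PySem.Dict.empty
  result.items.map (fun q => (q.1, q.2.items))

-- ===== PRECONDITION & SPEC =====
def Spec_pair_counts (sequences_A : List (List String)) (sequences_B : List (List String)) (out : List (String × List (String × Int))) : Prop := out = pair_counts_alt sequences_A sequences_B
instance (sequences_A : List (List String)) (sequences_B : List (List String)) (out : List (String × List (String × Int))) : Decidable (Spec_pair_counts sequences_A sequences_B out) := by unfold Spec_pair_counts; infer_instance

-- ===== CLAIM (what is proved, stated in full; the proofs are below) =====
def Claim_equal_pair_counts : Prop := ∀ (sequences_A : List (List String)) (sequences_B : List (List String)), Dom_pair_counts sequences_A sequences_B → Spec_pair_counts sequences_A sequences_B (pair_counts sequences_A sequences_B)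

-- ===== LEMMAS AND PROOFS =====

-- A's try/except step is an in-place bump of the nested count
theorem pcStepA_eq (d : PySem.Dict String (PySem.Dict String Int)) (p : String × String) :
    pcStepA d p =
      d.insert p.1 ((d.getD p.1 PySem.Dict.empty).insert p.2
        ((d.getD p.1 PySem.Dict.empty).getD p.2 0 + 1)) := by
  unfold pcStepA
  cases h : (d.getD p.1 PySem.Dict.empty).get? p.2 with
  | some c =>
    simp only [h]
    rw [PySem.Dict.getD_of_get?_eq_some _ _ h]
  | none =>
    simp only [h]
    rw [PySem.Dict.getD_of_get?_eq_none _ _ h]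
    norm_num

-- inner dict of A's fold at tag t = counting fold over the words paired with t
theorem loopA_getD (ps : List (String × String)) (d : PySem.Dict String (PySem.Dict String Int))
    (t : String) :
    (ps.foldl pcStepA d).getD t PySem.Dict.empty =
      ((ps.filter (fun p => p.1 == t)).map (·.2)).foldl
        (fun i w => i.insert w (i.getD w 0 + 1)) (d.getD t PySem.Dict.empty) := by
  induction ps generalizing d with
  | nil => rfl
  | cons p ps ih =>
    simp only [List.foldl_cons, ih, pcStepA_eq]
    by_cases h : p.1 = t
    · subst h
      simp [PySem.Dict.getD_insert_self]
    · have hb : (p.1 == t) = false := by simp [h]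
      simp [hb, PySem.Dict.getD_insert_of_ne _ _ _ (Ne.symm h)]

-- A's inner counting fold at tag t is the counter of t's words
theorem loopA_inner_counter (ps : List (String × String)) (t : String) :
    ((ps.foldl pcStepA PySem.Dict.empty).getD t PySem.Dict.empty) =
      PySem.Dict.counter ((ps.filter (fun p => p.1 == t)).map (·.2)) := by
  rw [loopA_getD, PySem.Dict.getD_empty,
    PySem.Dict.foldl_insert_getD_add_one_eq_counter]

-- B's per-tag rescan is the same counter
theorem pcCountTag_eq_counter (ps : List (String × String)) (t : String) :
    pcCountTag ps t = PySem.Dict.counter ((ps.filter (fun p => p.1 == t)).map (·.2)) := by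
  unfold pcCountTag
  rw [PySem.List.foldl_if_eq_foldl_filter, ← PySem.Dict.foldl_insert_getD_add_one_eq_counter,
    List.foldl_map]

-- B's first pass collects exactly set(tags) in first-appearance order
theorem seen_eq_ofList (ps : List (String × String)) :
    ps.foldl (fun seen p => if PySem.Set.contains seen p.1 then seen else seen ++ [p.1])
        ([] : List String) =
      PySem.Set.ofList (ps.map (·.1)) := by
  rw [PySem.Set.ofList_eq_foldl, List.foldl_map]
  rfl

-- A's outer dict has the distinct tags as keys, in first-appearance order, without repeats
theorem loopA_keys (ps : List (String × String)) :
    (ps.foldl pcStepA PySem.Dict.empty).keys = PySem.Set.ofList (ps.map (·.1)) := by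
  have hA : pcStepA = (fun d (x : String × String) =>
      d.insert x.1 ((d.getD x.1 PySem.Dict.empty).insert x.2
        ((d.getD x.1 PySem.Dict.empty).getD x.2 0 + 1))) :=
    funext fun d => funext fun p => pcStepA_eq d p
  rw [hA]
  have := PySem.Dict.keys_foldl_insert_key (ν := PySem.Dict String Int) ps
    (fun x => x.1)
    (fun d x => (d.getD x.1 PySem.Dict.empty).insert x.2
      ((d.getD x.1 PySem.Dict.empty).getD x.2 0 + 1)) PySem.Dict.empty
  simpa using this

theorem loopA_keys_nodup (ps : List (String × String)) :
    (ps.foldl pcStepA PySem.Dict.empty).keys.Nodup := by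
  have hA : pcStepA = (fun d (x : String × String) =>
      d.insert x.1 ((d.getD x.1 PySem.Dict.empty).insert x.2
        ((d.getD x.1 PySem.Dict.empty).getD x.2 0 + 1))) :=
    funext fun d => funext fun p => pcStepA_eq d p
  rw [hA]
  exact PySem.Dict.nodup_keys_foldl_insert_key _ _ _ _ (by simp [PySem.Dict.keys_empty])

-- B's outer loop inserts each distinct tag once: its items are seen.map (tag, counts)
theorem loopB_items (ps : List (String × String)) :
    ((PySem.Set.ofList (ps.map (·.1))).foldl
        (fun r tag => r.insert tag (pcCountTag ps tag)) PySem.Dict.empty).items =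
      (PySem.Set.ofList (ps.map (·.1))).map (fun t => (t, pcCountTag ps t)) := by
  have := PySem.Dict.items_foldl_insert_fresh (PySem.Set.ofList (ps.map (·.1)))
    (fun t => t) (fun t => pcCountTag ps t) PySem.Dict.empty
    (fun a _ => rfl) (by simp)
  simpa using this

-- the two nested dicts have the same items (same keys, same order, same inner dicts)
theorem items_eq (ps : List (String × String)) :
    (ps.foldl pcStepA PySem.Dict.empty).items =
      ((PySem.Set.ofList (ps.map (·.1))).foldl
        (fun r tag => r.insert tag (pcCountTag ps tag)) PySem.Dict.empty).items := by
  rw [PySem.Dict.items_eq_map_keys _ (loopA_keys_nodup ps) PySem.Dict.empty,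
    loopA_keys, loopB_items]
  apply List.map_congr_left
  intro t _
  rw [loopA_inner_counter, pcCountTag_eq_counter]

-- ===== VERDICT (by name: the statement is the Claim_ definition above) =====
theorem pair_counts_spec : Claim_equal_pair_counts := by
  intro sa sb _
  show pair_counts sa sb = pair_counts_alt sa sb
  simp only [pair_counts, pair_counts_alt, seen_eq_ofList]
  rw [items_eq]
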